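-- pv_equiv track=rewrite | github.com/getrod/token | music/encoding.py | pair_frequency
-- ===== SOURCE A (Python) =====
-- from collections import defaultdict
--
-- def pair_frequency(tokens, separator):
--     freq = defaultdict(int)
--     for i in range(len(tokens) - 1):
--         pair = (tokens[i], tokens[i+1])
--         if separator in pair: # Skip pairs that have separators
--             continue
--         else:
--             freq[pair] += 1
--     return freq
-- ===== SOURCE B (Python) =====
-- from collections import defaultdict
--
-- def pair_frequency(tokens, separator):
--     # Split tokens into maximal separator-free segments, then count
--     # adjacent pairs inside each segment (no per-pair separator test).
--     segments = []
--     current = []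
--     for t in tokens:
--         if t == separator:
--             if current:
--                 segments.append(current)
--             current = []
--         else:
--             current.append(t)
--     if current:
--         segments.append(current)
--     freq = defaultdict(int)
--     for seg in segments:
--         for pair in zip(seg, seg[1:]):
--             freq[pair] += 1
--     return freq
-- ===== Notes on version B (the rewrite author's own statement) =====
-- stated objective: alternative
-- what changed: B first splits the tokens into maximal separator-free segments and then counts adjacent pairs within each segment, instead of A's single indexed scan with a per-pair separator membership test.
import Mathlib
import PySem

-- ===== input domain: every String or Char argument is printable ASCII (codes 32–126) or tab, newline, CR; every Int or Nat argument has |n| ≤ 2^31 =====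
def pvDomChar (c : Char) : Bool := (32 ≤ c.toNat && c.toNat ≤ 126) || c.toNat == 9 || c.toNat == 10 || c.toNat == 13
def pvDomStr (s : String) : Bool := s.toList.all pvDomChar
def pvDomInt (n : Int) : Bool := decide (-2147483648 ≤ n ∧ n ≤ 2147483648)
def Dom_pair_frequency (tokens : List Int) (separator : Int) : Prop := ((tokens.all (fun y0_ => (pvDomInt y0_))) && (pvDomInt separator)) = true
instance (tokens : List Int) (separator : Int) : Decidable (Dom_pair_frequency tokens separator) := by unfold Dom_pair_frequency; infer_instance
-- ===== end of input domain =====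

-- B splits the tokens into maximal separator-free segments and counts adjacent
-- pairs inside each segment; same result, a different decomposition ("alternative").

-- ===== PORT A =====
-- freq = defaultdict(int); for i in range(len(tokens)-1): pair = (tokens[i], tokens[i+1]);
-- if separator in pair: continue; else freq[pair] += 1; return freq
def pair_frequency (tokens : List Int) (separator : Int) : List (Int × Int × Int) :=
  let freq : PySem.Dict (Int × Int) Int := PySem.Dict.empty
  let freq := (PySem.List.pyRange 0 ((tokens.length : Int) - 1)).foldl
    (fun d i =>
      let pair := (PySem.List.pyGetD tokens i 0, PySem.List.pyGetD tokens (i + 1) 0)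
      if separator = pair.1 ∨ separator = pair.2 then d
      else d.modify pair (0 : Int) (· + 1)) freq
  freq.items.map (fun p => (p.1.1, p.1.2, p.2))

-- ===== PORT B =====
-- adjacent pairs of a segment: zip(seg, seg[1:])
def pvPairs (seg : List Int) : List (Int × Int) := seg.zip (seg.drop 1)

-- the segmentation loop of Source B: state = (segments so far, current segment)
def pvSegStep (separator : Int) (acc : List (List Int) × List Int) (t : Int) :
    List (List Int) × List Int :=
  if t = separator then (if acc.2 = [] then acc.1 else acc.1 ++ [acc.2], [])
  else (acc.1, acc.2 ++ [t])

def pvSegments (tokens : List Int) (separator : Int) : List (List Int) :=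
  let p := tokens.foldl (pvSegStep separator) ([], [])
  if p.2 = [] then p.1 else p.1 ++ [p.2]

def pair_frequency_alt (tokens : List Int) (separator : Int) : List (Int × Int × Int) :=
  let freq : PySem.Dict (Int × Int) Int :=
    (pvSegments tokens separator).foldl
      (fun d seg => (pvPairs seg).foldl (fun d pr => d.modify pr (0 : Int) (· + 1)) d)
      PySem.Dict.empty
  freq.items.map (fun p => (p.1.1, p.1.2, p.2))

-- ===== PRECONDITION & SPEC =====
def Spec_pair_frequency (tokens : List Int) (separator : Int) (out : List (Int × Int × Int)) : Prop := out = pair_frequency_alt tokens separator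
instance (tokens : List Int) (separator : Int) (out : List (Int × Int × Int)) : Decidable (Spec_pair_frequency tokens separator out) := by unfold Spec_pair_frequency; infer_instance

-- ===== CLAIM (what is proved, stated in full; the proofs are below) =====
def Claim_equal_pair_frequency : Prop := ∀ (tokens : List Int) (separator : Int), Dom_pair_frequency tokens separator → Spec_pair_frequency tokens separator (pair_frequency tokens separator)

-- ===== LEMMAS AND PROOFS =====

-- the list of adjacent pairs that survive A's separator test
def pvKept (tokens : List Int) (separator : Int) : List (Int × Int) :=
  (tokens.zip (tokens.drop 1)).filter (fun p => !(separator = p.1 ∨ separator = p.2))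

-- pairs still to be produced from the pending segment `cur` followed by `rest`
def pvPT (sep : Int) (cur rest : List Int) : List (Int × Int) :=
  match rest with
  | [] => pvPairs cur
  | t :: r => if t = sep then pvPairs cur ++ pvPT sep [] r else pvPT sep (cur ++ [t]) r

-- the kept pairs of (last pending element, if any) ++ rest
def pvE (sep : Int) (lastO : Option Int) (rest : List Int) : List (Int × Int) :=
  pvKept (lastO.toList ++ rest) sep

-- A's indexed pair list is the adjacent-pairs zip
theorem pvA_pairs (tokens : List Int) :
    (PySem.List.pyRange 0 ((tokens.length : Int) - 1)).map
      (fun i => (PySem.List.pyGetD tokens i 0, PySem.List.pyGetD tokens (i + 1) 0))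
      = tokens.zip (tokens.drop 1) := by
  rcases tokens with _ | ⟨t, rest⟩
  · decide
  · have hn : (((t :: rest).length : Nat) : Int) - 1 = ((rest.length : Nat) : Int) := by
      simp [List.length_cons]
    rw [hn, PySem.List.pyRange_zero_natCast, List.map_map]
    apply List.ext_getElem
    · simp [List.length_zip]
    · intro i h1 h2
      have hi : i < rest.length := by simpa using h1
      have hi' : i + 1 < (t :: rest).length := by simp; omega
      have hcast : ((i : Int) + 1) = ((i + 1 : Nat) : Int) := by push_cast; ring
      simp only [Function.comp, List.getElem_map, List.getElem_range, hcast,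
        PySem.List.pyGetD_natCast, List.getElem_zip, List.getElem_drop]
      rw [List.getD_eq_getElem _ _ (by simp; omega), List.getD_eq_getElem _ _ hi']
      simp [Nat.add_comm 1 i]

-- a fold that skips on a condition is a fold over the filtered list
theorem pvFoldl_skip {α β : Type} (c : β → Prop) [DecidablePred c] (f : α → β → α) :
    ∀ (l : List β) (a : α),
      l.foldl (fun d p => if c p then d else f d p) a = (l.filter (fun p => !c p)).foldl f a := by
  intro l
  induction l with
  | nil => intro a; rfl
  | cons x xs ih => intro a; by_cases h : c x <;> simp [h, ih]

-- a nested fold over segments is a fold over the flattened pair list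
theorem pvFoldl_flat {α β γ : Type} (g : β → List γ) (f : α → γ → α) :
    ∀ (l : List β) (a : α),
      l.foldl (fun d seg => (g seg).foldl f d) a = (l.flatMap g).foldl f a := by
  intro l
  induction l with
  | nil => intro a; rfl
  | cons x xs ih => intro a; simp [List.flatMap_cons, List.foldl_append, ih]

theorem pvPairs_cons_cons (c x : Int) (l : List Int) :
    pvPairs (c :: x :: l) = (c, x) :: pvPairs (x :: l) := by
  simp [pvPairs]

theorem pvPairs_append_singleton (cur : List Int) (t : Int) :
    pvPairs (cur ++ [t])
      = pvPairs cur ++ cur.getLast?.elim [] (fun l => [(l, t)]) := by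
  induction cur with
  | nil => simp [pvPairs]
  | cons c cs ih =>
    cases cs with
    | nil => simp [pvPairs]
    | cons x xs =>
      simp only [List.cons_append] at ih ⊢
      rw [pvPairs_cons_cons, pvPairs_cons_cons, ih]
      simp [List.getLast?_cons_cons]

theorem pvKept_sep_cons (sep : Int) (r : List Int) :
    pvKept (sep :: r) sep = pvKept r sep := by
  cases r with
  | nil => rfl
  | cons a r' => simp [pvKept]

theorem pvKept_cons_sep (l sep : Int) (r : List Int) :
    pvKept (l :: sep :: r) sep = pvKept (sep :: r) sep := by
  simp [pvKept]

theorem pvKept_cons_cons (l t sep : Int) (r : List Int) (hl : l ≠ sep) (ht : t ≠ sep) :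
    pvKept (l :: t :: r) sep = (l, t) :: pvKept (t :: r) sep := by
  simp [pvKept, Ne.symm hl, Ne.symm ht]

theorem pvE_sep (sep : Int) (lastO : Option Int) (r : List Int) :
    pvE sep lastO (sep :: r) = pvE sep none r := by
  cases lastO with
  | none => simpa [pvE] using pvKept_sep_cons sep r
  | some l =>
    show pvKept (l :: sep :: r) sep = pvKept r sep
    rw [pvKept_cons_sep, pvKept_sep_cons]

theorem pvE_step (sep t : Int) (lastO : Option Int) (r : List Int) (ht : t ≠ sep)
    (hl : ∀ l, lastO = some l → l ≠ sep) :
    pvE sep lastO (t :: r)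
      = lastO.elim [] (fun l => [(l, t)]) ++ pvE sep (some t) r := by
  cases lastO with
  | none => rfl
  | some l =>
    show pvKept (l :: t :: r) sep = (l, t) :: pvKept (t :: r) sep
    exact pvKept_cons_cons l t sep r (hl l rfl) ht

-- the pending-segment recursion computes exactly the kept pairs
theorem pvPT_spec (sep : Int) :
    ∀ (rest cur : List Int), (∀ x ∈ cur, x ≠ sep) →
      pvPT sep cur rest = pvPairs cur ++ pvE sep cur.getLast? rest := by
  intro rest
  induction rest with
  | nil =>
    intro cur _
    have h0 : pvE sep cur.getLast? [] = [] := by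
      cases h : cur.getLast? <;> simp [pvE, pvKept]
    simp [pvPT, h0]
  | cons t r ih =>
    intro cur hcur
    by_cases ht : t = sep
    · subst ht
      rw [show pvPT t cur (t :: r) = pvPairs cur ++ pvPT t [] r by simp [pvPT]]
      rw [ih [] (by simp), pvE_sep]
      simp [pvPairs]
    · have hcur' : ∀ x ∈ cur ++ [t], x ≠ sep := by
        intro x hx
        rcases List.mem_append.mp hx with h | h
        · exact hcur x h
        · rw [List.mem_singleton.mp h]; exact ht
      rw [show pvPT sep cur (t :: r) = pvPT sep (cur ++ [t]) r by simp [pvPT, ht]]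
      rw [ih (cur ++ [t]) hcur', pvPairs_append_singleton,
        pvE_step sep t cur.getLast? r ht (fun l hl => hcur l (List.mem_of_getLast? hl))]
      simp [List.getLast?_append]

-- the segmentation fold flattens to the pending-segment recursion
theorem pvSeg_fold (sep : Int) :
    ∀ (rest : List Int) (segs : List (List Int)) (cur : List Int),
      (if (rest.foldl (pvSegStep sep) (segs, cur)).2 = []
        then (rest.foldl (pvSegStep sep) (segs, cur)).1
        else (rest.foldl (pvSegStep sep) (segs, cur)).1
          ++ [(rest.foldl (pvSegStep sep) (segs, cur)).2]).flatMap pvPairs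
        = segs.flatMap pvPairs ++ pvPT sep cur rest := by
  intro rest
  induction rest with
  | nil =>
    intro segs cur
    by_cases h : cur = [] <;> simp [pvPT, h, pvPairs]
  | cons t r ih =>
    intro segs cur
    rw [List.foldl_cons]
    by_cases ht : t = sep
    · by_cases h : cur = []
      · rw [show pvSegStep sep (segs, cur) t = (segs, []) from by simp [pvSegStep, ht, h], ih]
        subst h
        simp [pvPT, ht, pvPairs]
      · rw [show pvSegStep sep (segs, cur) t = (segs ++ [cur], []) from by
            simp [pvSegStep, ht, h], ih]
        simp [pvPT, ht]
    · rw [show pvSegStep sep (segs, cur) t = (segs, cur ++ [t]) from by simp [pvSegStep, ht], ih]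
      simp [pvPT, ht]

-- the pairs produced by segmentation are exactly the kept pairs
theorem pvSeg_pairs (tokens : List Int) (separator : Int) :
    (pvSegments tokens separator).flatMap pvPairs = pvKept tokens separator := by
  have h := pvSeg_fold separator tokens [] []
  rw [pvPT_spec separator tokens [] (by simp)] at h
  simpa [pvPairs, pvE] using h

-- ===== VERDICT (by name: the statement is the Claim_ definition above) =====
theorem pair_frequency_spec : Claim_equal_pair_frequency := by
  intro tokens separator _
  unfold Spec_pair_frequency pair_frequency pair_frequency_alt
  have key : (PySem.List.pyRange 0 ((tokens.length : Int) - 1)).foldl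
      (fun (d : PySem.Dict (Int × Int) Int) (i : Int) =>
        if separator = PySem.List.pyGetD tokens i 0 ∨ separator = PySem.List.pyGetD tokens (i + 1) 0
        then d
        else d.modify (PySem.List.pyGetD tokens i 0, PySem.List.pyGetD tokens (i + 1) 0)
          (0 : Int) (· + 1))
      PySem.Dict.empty
      = (pvSegments tokens separator).foldl
        (fun d seg => (pvPairs seg).foldl (fun d pr => d.modify pr (0 : Int) (· + 1)) d)
        PySem.Dict.empty := by
    have e1 : (PySem.List.pyRange 0 ((tokens.length : Int) - 1)).foldl
        (fun (d : PySem.Dict (Int × Int) Int) (i : Int) =>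
          if separator = PySem.List.pyGetD tokens i 0
              ∨ separator = PySem.List.pyGetD tokens (i + 1) 0
          then d
          else d.modify (PySem.List.pyGetD tokens i 0, PySem.List.pyGetD tokens (i + 1) 0)
            (0 : Int) (· + 1))
        PySem.Dict.empty
        = ((PySem.List.pyRange 0 ((tokens.length : Int) - 1)).map
            (fun i => (PySem.List.pyGetD tokens i 0, PySem.List.pyGetD tokens (i + 1) 0))).foldl
          (fun (d : PySem.Dict (Int × Int) Int) p =>
            if separator = p.1 ∨ separator = p.2 then d else d.modify p (0 : Int) (· + 1))
          PySem.Dict.empty :=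
      (List.foldl_map
        (f := fun i => (PySem.List.pyGetD tokens i 0, PySem.List.pyGetD tokens (i + 1) 0))
        (g := fun (d : PySem.Dict (Int × Int) Int) p =>
          if separator = p.1 ∨ separator = p.2 then d else d.modify p (0 : Int) (· + 1))).symm
    rw [e1, pvA_pairs,
      pvFoldl_skip (fun p : Int × Int => separator = p.1 ∨ separator = p.2)
        (fun (d : PySem.Dict (Int × Int) Int) p => d.modify p (0 : Int) (· + 1)),
      pvFoldl_flat pvPairs, pvSeg_pairs]
    rfl
  exact congrArg
    (fun d : PySem.Dict (Int × Int) Int => d.items.map (fun p => (p.1.1, p.1.2, p.2))) key
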